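-- pv_equiv track=rewrite | github.com/Stylianos29/qpb_data_analysis | core/src/analysis/plateau_extraction/_plateau_visualization_config.py | calculate_panel_layout
-- ===== SOURCE A (Python) =====
-- from typing import Dict, Any, List
--
-- def calculate_panel_layout(n_samples: int, max_per_figure: int) -> List[int]:
--     """Calculate how to distribute samples across figures."""
--     n_figures = (n_samples + max_per_figure - 1) // max_per_figure
--     samples_per_figure = []
--
--     remaining = n_samples
--     for i in range(n_figures):
--         samples_this_figure = min(max_per_figure, remaining)
--         samples_per_figure.append(samples_this_figure)
--         remaining -= samples_this_figure
--
--     return samples_per_figure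
-- ===== SOURCE B (Python) =====
-- def calculate_panel_layout(n_samples: int, max_per_figure: int):
--     """Closed-form distribution: full figures then the remainder."""
--     n_figures = (n_samples + max_per_figure - 1) // max_per_figure
--     if n_figures <= 0:
--         return []
--     return [max_per_figure] * (n_figures - 1) + [n_samples - (n_figures - 1) * max_per_figure]
-- ===== Notes on version B (the rewrite author's own statement) =====
-- stated objective: simpler
-- what changed: replaces the per-figure loop with the running 'remaining' accumulator by a closed-form list: n_figures-1 full figures of max_per_figure plus one final remainder figure computed arithmetically
-- outside the precondition, e.g. on calculate_panel_layout(-5, -2): A returns [-5, -2, -2, -2], B returns [-2, -2, -2, 1]; on calculate_panel_layout(5, 0): A raises ZeroDivisionError, B raises ZeroDivisionError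
import Mathlib
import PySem

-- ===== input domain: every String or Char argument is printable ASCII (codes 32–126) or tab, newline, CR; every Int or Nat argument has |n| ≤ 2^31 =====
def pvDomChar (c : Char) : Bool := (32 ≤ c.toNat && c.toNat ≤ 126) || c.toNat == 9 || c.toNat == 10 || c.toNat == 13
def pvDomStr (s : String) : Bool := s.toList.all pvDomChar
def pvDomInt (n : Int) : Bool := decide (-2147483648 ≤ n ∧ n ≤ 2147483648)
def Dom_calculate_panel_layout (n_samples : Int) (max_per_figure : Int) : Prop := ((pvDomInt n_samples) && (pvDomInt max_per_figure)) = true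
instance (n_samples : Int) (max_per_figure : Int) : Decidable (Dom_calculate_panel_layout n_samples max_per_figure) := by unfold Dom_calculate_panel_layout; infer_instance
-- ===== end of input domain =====

-- B replaces A's per-figure loop with a closed-form counts list (simpler; same cost).

-- ===== PORT A =====
def calculate_panel_layout (n_samples : Int) (max_per_figure : Int) : List Int :=
  let n_figures := PySem.Int.floordiv (n_samples + max_per_figure - 1) max_per_figure
  let st := (PySem.List.pyRange 0 n_figures 1).foldl
    (fun (st : List Int × Int) (_ : Int) =>
      let samples_this_figure := min max_per_figure st.2
      (st.1 ++ [samples_this_figure], st.2 - samples_this_figure))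
    ([], n_samples)
  st.1

-- ===== PORT B =====
def calculate_panel_layout_alt (n_samples : Int) (max_per_figure : Int) : List Int :=
  let n_figures := PySem.Int.floordiv (n_samples + max_per_figure - 1) max_per_figure
  if n_figures ≤ 0 then []
  else List.replicate (n_figures - 1).toNat max_per_figure
       ++ [n_samples - (n_figures - 1) * max_per_figure]

-- ===== PRECONDITION & SPEC =====
-- Pre_ restricts to the function's natural domain, max_per_figure ≥ 1: max_per_figure = 0 makes
-- A raise ZeroDivisionError, and a negative max_per_figure is outside the task's meaning
-- (a "maximum number of samples per figure"); A does return accidental values there.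
def Pre_calculate_panel_layout (n_samples : Int) (max_per_figure : Int) : Prop :=
  1 ≤ max_per_figure
instance (n_samples : Int) (max_per_figure : Int) : Decidable (Pre_calculate_panel_layout n_samples max_per_figure) := by unfold Pre_calculate_panel_layout; infer_instance

def pvWitness_calculate_panel_layout : Int × Int := (7, 3)

def Spec_calculate_panel_layout (n_samples : Int) (max_per_figure : Int) (out : List Int) : Prop := out = calculate_panel_layout_alt n_samples max_per_figure
instance (n_samples : Int) (max_per_figure : Int) (out : List Int) : Decidable (Spec_calculate_panel_layout n_samples max_per_figure out) := by unfold Spec_calculate_panel_layout; infer_instance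

-- ===== CLAIM (what is proved, stated in full; the proofs are below) =====
def Claim_equal_calculate_panel_layout : Prop := ∀ (n_samples : Int) (max_per_figure : Int), Dom_calculate_panel_layout n_samples max_per_figure → Pre_calculate_panel_layout n_samples max_per_figure → Spec_calculate_panel_layout n_samples max_per_figure (calculate_panel_layout n_samples max_per_figure)

-- ===== LEMMAS AND PROOFS =====

-- A's loop, run for k+1 iterations on remaining 'rem' with k*m < rem ≤ (k+1)*m,
-- appends k full figures of m and one final figure of rem - k*m.
lemma loop_closed_form (m : Int) (hm : 1 ≤ m) :
    ∀ (k : Nat) (l : List Int), l.length = k + 1 → ∀ (acc : List Int) (rem : Int),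
      (k : Int) * m < rem → rem ≤ ((k : Int) + 1) * m →
      (l.foldl (fun (st : List Int × Int) (_ : Int) =>
          let s := min m st.2
          (st.1 ++ [s], st.2 - s)) (acc, rem)).1
      = acc ++ List.replicate k m ++ [rem - (k : Int) * m] := by
  intro k
  induction k with
  | zero =>
    intro l hl acc rem h1 h2
    match l, hl with
    | [x], _ =>
      simp only [List.foldl]
      have : min m rem = rem := by omega
      simp [this]
  | succ k ih =>
    intro l hl acc rem h1 h2
    match l with
    | x :: l' =>
      have hl' : l'.length = k + 1 := by simpa using hl
      simp only [List.foldl]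
      have hmle : m ≤ rem := by
        have h0 : 0 ≤ (k : Int) * m := mul_nonneg (Int.natCast_nonneg k) (by linarith)
        push_cast at h1; linarith
      rw [min_eq_left hmle]
      have h1' : (k : Int) * m < rem - m := by push_cast at h1; linarith
      have h2' : rem - m ≤ ((k : Int) + 1) * m := by push_cast at h2; linarith
      rw [ih l' hl' (acc ++ [m]) (rem - m) h1' h2']
      have : rem - m - (k : Int) * m = rem - ((k : Int) + 1) * m := by ring
      rw [this]
      simp [List.replicate_succ]

-- ===== VERDICT (by name: the statement is the Claim_ definition above) =====
theorem calculate_panel_layout_spec : Claim_equal_calculate_panel_layout := by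
  intro n m _ hm
  have hm1 : (1 : Int) ≤ m := hm
  unfold Spec_calculate_panel_layout calculate_panel_layout calculate_panel_layout_alt
  simp only []
  set q := PySem.Int.floordiv (n + m - 1) m with hq
  have hb := PySem.Int.floordiv_mul_add_mod (n + m - 1) m
  have hr0 : 0 ≤ PySem.Int.mod (n + m - 1) m := PySem.Int.mod_nonneg (n + m - 1) (by linarith)
  have hr1 : PySem.Int.mod (n + m - 1) m < m := PySem.Int.mod_lt (n + m - 1) (by linarith)
  rw [← hq] at hb
  by_cases hq0 : q ≤ 0
  · -- no figures: the range is empty, both sides are []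
    rw [PySem.List.pyRange_one_eq_nil (by omega)]
    simp [hq0]
  · push_neg at hq0
    rw [if_neg (by omega)]
    have hk : q = ((q - 1).toNat : Int) + 1 := by omega
    have hlen : (PySem.List.pyRange 0 q 1).length = (q - 1).toNat + 1 := by
      rw [PySem.List.length_pyRange_one]; omega
    have hc : ((q - 1).toNat : Int) = q - 1 := by omega
    have hlo : ((q - 1).toNat : Int) * m < n := by
      rw [hc]; nlinarith [hb, hr0, hr1]
    have hhi : n ≤ (((q - 1).toNat : Int) + 1) * m := by
      rw [hc]; nlinarith [hb, hr0, hr1]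
    rw [loop_closed_form m hm1 (q - 1).toNat _ hlen [] n hlo hhi]
    rw [hc]
    simp
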